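-- pv_equiv track=rewrite | github.com/AIZero/2018Teddy_cup_B | 代码/useritemCF.py | getUseritemDataStructure
-- ===== SOURCE A (Python) =====
-- def getUseritemDataStructure(moivelist):
--     # userDict[10001]=[1,4,8,9].... 表示用户2看过影视1，4，8，9
--     #itemUser[1]=[10001,10038,10158].....表示电影4被用户10001，10038，10158看过
--     userDict = {}
--     itemUser = {}
--     moivelist1=[]
--     for moive in moivelist:
--         if moive not in moivelist1:
--             moivelist1.append(moive)
--     for k in moivelist1:
--         if k[0] in userDict:
--             userDict[k[0]].append(k[1])
--         else:
--             userDict[k[0]] = [k[1]]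
--         if k[1] in itemUser:
--             itemUser[k[1]].append(k[0])
--         else:
--             itemUser[k[1]] = [k[0]]
--     return userDict, itemUser
-- ===== SOURCE B (Python) =====
-- def _addOnce(d, a, b):
--     # append b to d[a] (creating d[a] if needed) unless already present
--     lst = d.setdefault(a, [])
--     if b not in lst:
--         lst.append(b)
--
-- def getUseritemDataStructure(moivelist):
--     # No explicit pair-dedup pre-pass: two symmetric grouping passes, each
--     # using the per-key list itself as the dedup witness.
--     userDict = {}
--     for u, i in moivelist:
--         _addOnce(userDict, u, i)
--     itemUser = {}
--     for u, i in moivelist: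
--         _addOnce(itemUser, i, u)
--     return userDict, itemUser
-- ===== Notes on version B (the rewrite author's own statement) =====
-- stated objective: simpler
-- what changed: Dropped A's explicit order-preserving pair-dedup pre-pass (quadratic scan of a growing seen-list) and its combined build loop; B makes two independent symmetric grouping passes over the raw pairs, each using the per-key list itself as the dedup witness via a shared setdefault helper.
import Mathlib
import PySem

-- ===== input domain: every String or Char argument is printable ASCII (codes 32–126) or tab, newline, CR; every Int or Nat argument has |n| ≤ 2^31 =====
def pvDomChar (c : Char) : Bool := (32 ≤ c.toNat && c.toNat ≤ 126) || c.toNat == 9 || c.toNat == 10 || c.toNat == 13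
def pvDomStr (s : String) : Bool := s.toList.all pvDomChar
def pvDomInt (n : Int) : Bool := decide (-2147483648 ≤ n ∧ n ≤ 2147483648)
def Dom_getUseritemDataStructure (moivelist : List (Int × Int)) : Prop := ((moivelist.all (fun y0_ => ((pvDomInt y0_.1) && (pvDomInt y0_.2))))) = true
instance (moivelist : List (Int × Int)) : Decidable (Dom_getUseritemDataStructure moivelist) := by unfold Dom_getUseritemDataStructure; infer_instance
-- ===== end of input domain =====

-- B replaces A's pair-dedup pre-pass + combined build loop by two independent symmetric grouping passes whose per-key lists are the dedup witness (objective: simpler).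

-- ===== PORT A =====
-- one step of A's build loop over the deduplicated pair list
def stepA (p : PySem.Dict Int (List Int) × PySem.Dict Int (List Int)) (k : Int × Int) :
    PySem.Dict Int (List Int) × PySem.Dict Int (List Int) :=
  let ud := if p.1.contains k.1 then p.1.modify k.1 [] (· ++ [k.2]) else p.1.insert k.1 [k.2]
  let iu := if p.2.contains k.2 then p.2.modify k.2 [] (· ++ [k.1]) else p.2.insert k.2 [k.1]
  (ud, iu)

def getUseritemDataStructure (moivelist : List (Int × Int)) : (List (Int × List Int)) × (List (Int × List Int)) :=
  let moivelist1 := moivelist.foldl (fun acc m => if m ∈ acc then acc else acc ++ [m]) []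
  let r := moivelist1.foldl stepA (PySem.Dict.empty, PySem.Dict.empty)
  (r.1.items, r.2.items)

-- ===== PORT B =====
-- _addOnce: d.setdefault(a, []) then append b unless already present
def addOnce (d : PySem.Dict Int (List Int)) (a b : Int) : PySem.Dict Int (List Int) :=
  let d1 := if d.contains a then d else d.insert a []
  if (d1.getD a []).contains b then d1 else d1.modify a [] (· ++ [b])

def getUseritemDataStructure_alt (moivelist : List (Int × Int)) : (List (Int × List Int)) × (List (Int × List Int)) :=
  let userDict := moivelist.foldl (fun d k => addOnce d k.1 k.2) PySem.Dict.empty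
  let itemUser := moivelist.foldl (fun d k => addOnce d k.2 k.1) PySem.Dict.empty
  (userDict.items, itemUser.items)

-- ===== PRECONDITION & SPEC =====
def Spec_getUseritemDataStructure (moivelist : List (Int × Int)) (out : (List (Int × List Int)) × (List (Int × List Int))) : Prop := out = getUseritemDataStructure_alt moivelist
instance (moivelist : List (Int × Int)) (out : (List (Int × List Int)) × (List (Int × List Int))) : Decidable (Spec_getUseritemDataStructure moivelist out) := by unfold Spec_getUseritemDataStructure; infer_instance

-- ===== CLAIM (what is proved, stated in full; the proofs are below) =====
def Claim_equal_getUseritemDataStructure : Prop := ∀ (moivelist : List (Int × Int)), Dom_getUseritemDataStructure moivelist → Spec_getUseritemDataStructure moivelist (getUseritemDataStructure moivelist)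

-- ===== LEMMAS AND PROOFS =====

-- the list of NEW elements A's dedup loop appends beyond an already-seen prefix
def news (seen : List (Int × Int)) : List (Int × Int) → List (Int × Int)
  | [] => []
  | x :: xs => if x ∈ seen then news seen xs else x :: news (seen ++ [x]) xs

theorem dedup_eq (l seen : List (Int × Int)) :
    l.foldl (fun acc m => if m ∈ acc then acc else acc ++ [m]) seen = seen ++ news seen l := by
  induction l generalizing seen with
  | nil => simp [news]
  | cons x xs ih =>
    simp only [List.foldl_cons, news]
    by_cases h : x ∈ seen
    · simp [h, ih]
    · simp [h, ih (seen ++ [x])]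

-- if b is already in d[a], addOnce does nothing
theorem addOnce_mem_id (d : PySem.Dict Int (List Int)) (a b : Int)
    (h : b ∈ d.getD a []) : addOnce d a b = d := by
  have hc : d.contains a = true := by
    by_contra hc'
    have hc'' : d.contains a = false := by simpa using hc'
    have : d.getD a [] = ([] : List Int) := PySem.Dict.getD_of_not_contains _ _ hc''
    simp [this] at h
  simp [addOnce, hc, h]

-- membership after addOnce
theorem mem_addOnce (d : PySem.Dict Int (List Int)) (a b a' b' : Int) :
    b' ∈ (addOnce d a b).getD a' [] ↔ b' ∈ d.getD a' [] ∨ (a' = a ∧ b' = b) := by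
  unfold addOnce
  by_cases ha : a' = a
  · subst ha
    by_cases hc : d.contains a' = true
    · simp only [hc, if_true]
      by_cases hb : b ∈ d.getD a' []
      · simp only [List.contains_eq_mem, decide_eq_true_eq, hb, if_true]
        constructor
        · exact fun h => Or.inl h
        · rintro (h | ⟨-, rfl⟩) <;> [exact h; exact hb]
      · simp only [List.contains_eq_mem, decide_eq_true_eq, hb, if_false,
          PySem.Dict.getD_modify_self, List.mem_append, List.mem_singleton]
        tauto
    · have hc' : d.contains a' = false := by simpa using hc
      have h0 : d.getD a' [] = ([] : List Int) := PySem.Dict.getD_of_not_contains _ _ hc'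
      simp [hc', h0, PySem.Dict.getD_insert_self, PySem.Dict.getD_modify_self]
  · by_cases hc : d.contains a = true
    · simp only [hc, if_true]
      by_cases hb : b ∈ d.getD a []
      · simp only [List.contains_eq_mem, decide_eq_true_eq, hb, if_true]
        tauto
      · simp only [List.contains_eq_mem, decide_eq_true_eq, hb, if_false,
          PySem.Dict.getD_modify_of_ne _ _ _ ha]
        tauto
    · have hc' : d.contains a = false := by simpa using hc
      have h0 : d.getD a [] = ([] : List Int) := PySem.Dict.getD_of_not_contains _ _ hc'
      have hgi : (d.insert a ([] : List Int)).getD a' [] = d.getD a' [] :=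
        PySem.Dict.getD_insert_of_ne _ _ _ ha
      simp only [hc', Bool.false_eq_true, if_false, PySem.Dict.getD_insert_self,
        List.contains_nil, Bool.false_eq_true, if_false,
        PySem.Dict.getD_modify_of_ne _ _ _ ha, hgi]
      tauto

-- on a novel pair, A's combined step is the pair of B's two addOnce updates
theorem stepA_eq (d1 d2 : PySem.Dict Int (List Int)) (x : Int × Int)
    (h1 : x.2 ∉ d1.getD x.1 []) (h2 : x.1 ∉ d2.getD x.2 []) :
    stepA (d1, d2) x = (addOnce d1 x.1 x.2, addOnce d2 x.2 x.1) := by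
  have e1 : (if d1.contains x.1 then d1.modify x.1 [] (· ++ [x.2]) else d1.insert x.1 [x.2])
      = addOnce d1 x.1 x.2 := by
    by_cases hc : d1.contains x.1 = true
    · simp [addOnce, hc, h1]
    · have hc' : d1.contains x.1 = false := by simpa using hc
      simp [addOnce, hc', PySem.Dict.getD_insert_self, PySem.Dict.modify,
            PySem.Dict.insert_insert_self]
  have e2 : (if d2.contains x.2 then d2.modify x.2 [] (· ++ [x.1]) else d2.insert x.2 [x.1])
      = addOnce d2 x.2 x.1 := by
    by_cases hc : d2.contains x.2 = true
    · simp [addOnce, hc, h2]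
    · have hc' : d2.contains x.2 = false := by simpa using hc
      simp [addOnce, hc', PySem.Dict.getD_insert_self, PySem.Dict.modify,
            PySem.Dict.insert_insert_self]
  simp [stepA, e1, e2]

-- the two invariants: the seen-pair set is recorded in each dict
def INV1 (seen : List (Int × Int)) (d : PySem.Dict Int (List Int)) : Prop :=
  ∀ u i : Int, ((u, i) ∈ seen) ↔ i ∈ d.getD u []

def INV2 (seen : List (Int × Int)) (d : PySem.Dict Int (List Int)) : Prop :=
  ∀ u i : Int, ((u, i) ∈ seen) ↔ u ∈ d.getD i []

theorem main_lemma (l : List (Int × Int)) (seen : List (Int × Int))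
    (d1 d2 : PySem.Dict Int (List Int)) (h1 : INV1 seen d1) (h2 : INV2 seen d2) :
    (news seen l).foldl stepA (d1, d2)
      = (l.foldl (fun d k => addOnce d k.1 k.2) d1, l.foldl (fun d k => addOnce d k.2 k.1) d2) := by
  induction l generalizing seen d1 d2 with
  | nil => simp [news]
  | cons x xs ih =>
    simp only [news, List.foldl_cons]
    by_cases hmem : x ∈ seen
    · -- duplicate pair: A's dedup drops it, both of B's updates are the identity
      have hx : ((x.1, x.2) ∈ seen) := by simpa using hmem
      have e1 : addOnce d1 x.1 x.2 = d1 := addOnce_mem_id _ _ _ ((h1 x.1 x.2).mp hx)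
      have e2 : addOnce d2 x.2 x.1 = d2 := addOnce_mem_id _ _ _ ((h2 x.1 x.2).mp hx)
      simp only [hmem, if_true, e1, e2]
      exact ih seen d1 d2 h1 h2
    · -- novel pair: A takes one combined step, B takes one step in each dict
      have hx : ¬ ((x.1, x.2) ∈ seen) := by simpa using hmem
      have hn1 : x.2 ∉ d1.getD x.1 [] := fun h => hx ((h1 x.1 x.2).mpr h)
      have hn2 : x.1 ∉ d2.getD x.2 [] := fun h => hx ((h2 x.1 x.2).mpr h)
      simp only [hmem, if_false, List.foldl_cons, stepA_eq d1 d2 x hn1 hn2]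
      refine ih (seen ++ [x]) _ _ ?_ ?_
      · intro u i
        rw [mem_addOnce]
        constructor
        · intro h
          rcases List.mem_append.mp h with h | h
          · exact Or.inl ((h1 u i).mp h)
          · have : (u, i) = x := by simpa using h
            exact Or.inr ⟨congrArg Prod.fst this, congrArg Prod.snd this⟩
        · rintro (h | ⟨hu, hi⟩)
          · exact List.mem_append_left _ ((h1 u i).mpr h)
          · refine List.mem_append_right _ ?_
            simp [hu, hi]
      · intro u i
        rw [mem_addOnce]
        constructor
        · intro h
          rcases List.mem_append.mp h with h | h
          · exact Or.inl ((h2 u i).mp h)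
          · have : (u, i) = x := by simpa using h
            exact Or.inr ⟨congrArg Prod.snd this, congrArg Prod.fst this⟩
        · rintro (h | ⟨hi, hu⟩)
          · exact List.mem_append_left _ ((h2 u i).mpr h)
          · refine List.mem_append_right _ ?_
            simp [hu, hi]

-- ===== VERDICT (by name: the statement is the Claim_ definition above) =====
theorem getUseritemDataStructure_spec : Claim_equal_getUseritemDataStructure := by
  intro l _
  unfold Spec_getUseritemDataStructure
  simp only [getUseritemDataStructure, getUseritemDataStructure_alt]
  rw [dedup_eq l [], List.nil_append,
      main_lemma l [] PySem.Dict.empty PySem.Dict.empty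
        (by intro u i; simp [PySem.Dict.getD_empty])
        (by intro u i; simp [PySem.Dict.getD_empty])]
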